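-- pv_equiv track=rewrite | github.com/Leiisawesome/feelies | src/feelies/research/cpcv.py | _purged_train_indices
-- ===== SOURCE A (Python) =====
-- def _purged_train_indices(
--     test_indices: tuple[int, ...],
--     embargo_bars: int,
--     n_bars: int,
-- ) -> tuple[int, ...]:
--     """Return the training bar indices given the test set,
--     after applying purge + embargo.
--
--     Purge: any bar whose index lies in the test set is removed from
--     training (the simple index-overlap purge appropriate when
--     *labels* are computed at the bar boundary itself; if the alpha
--     uses overlapping label windows the caller should pass a wider
--     test set or pre-purge the returns themselves before calling
--     :func:`build_cpcv_evidence`).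
--
--     Embargo: the ``embargo_bars`` bars immediately following each
--     *contiguous test region* are also excluded from training.  The
--     embargo is one-sided (post-test only) by convention, since
--     causal alphas only leak forward through serial correlation.
--     """
--     test_set = set(test_indices)
--
--     embargoed: set[int] = set()
--     if embargo_bars > 0 and test_indices:
--         in_region = False
--         region_end = -1
--         for i in range(n_bars):
--             if i in test_set:
--                 if not in_region:
--                     in_region = True
--                 region_end = i
--             else:
--                 if in_region:
--                     in_region = False
--                     for j in range(
--                         region_end + 1,
--                         min(region_end + 1 + embargo_bars, n_bars),
--                     ):
--                         if j not in test_set: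
--                             embargoed.add(j)
--
--     return tuple(
--         i
--         for i in range(n_bars)
--         if i not in test_set and i not in embargoed
--     )
-- ===== SOURCE B (Python) =====
-- def _purged_train_indices(
--     test_indices: tuple[int, ...],
--     embargo_bars: int,
--     n_bars: int,
-- ) -> tuple[int, ...]:
--     """Training bars after purge + embargo, via a stateless per-bar test.
--
--     No embargoed set is accumulated: bar i is a training bar iff it is
--     not a test bar and no contiguous-test-region end t (t in the test
--     set with t+1 not in it) lies within the embargo_bars bars just
--     before i, i.e. in range(max(0, i - embargo_bars), i).
--     """
--     test_set = set(test_indices)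
--
--     def is_train(i: int) -> bool:
--         if i in test_set:
--             return False
--         return not any(
--             t in test_set and (t + 1) not in test_set
--             for t in range(max(0, i - embargo_bars), i)
--         )
--
--     return tuple(i for i in range(n_bars) if is_train(i))
-- ===== Notes on version B (the rewrite author's own statement) =====
-- stated objective: alternative
-- what changed: Replaces A's stateful scan (in_region/region_end flags building a mutable embargoed set) by a stateless per-bar predicate: bar i trains iff it is not a test bar and no region end (t in the test set, t+1 not) lies in the embargo window range(max(0,i-embargo_bars), i); no embargo set is ever built.
import Mathlib
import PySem

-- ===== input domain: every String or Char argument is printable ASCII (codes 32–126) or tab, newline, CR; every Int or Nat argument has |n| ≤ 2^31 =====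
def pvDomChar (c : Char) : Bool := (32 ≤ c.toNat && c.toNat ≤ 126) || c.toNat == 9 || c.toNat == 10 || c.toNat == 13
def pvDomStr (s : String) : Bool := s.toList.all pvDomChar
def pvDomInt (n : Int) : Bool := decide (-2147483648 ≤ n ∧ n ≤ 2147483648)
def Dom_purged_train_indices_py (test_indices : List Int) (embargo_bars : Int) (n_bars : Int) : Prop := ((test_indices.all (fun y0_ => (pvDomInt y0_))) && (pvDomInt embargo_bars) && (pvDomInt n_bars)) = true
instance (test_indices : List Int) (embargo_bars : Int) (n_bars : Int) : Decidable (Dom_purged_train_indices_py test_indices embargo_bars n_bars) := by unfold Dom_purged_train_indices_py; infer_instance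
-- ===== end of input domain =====

-- B replaces A's stateful scan that accumulates a mutable embargoed set by a stateless
-- per-bar predicate over a backward embargo window (alternative decomposition, no speed claim).

-- ===== PORT A =====
-- A's inner loop: 'for j in range(...): if j not in test_set: embargoed.add(j)'
def embStep (ts : PySem.Set Int) (emb : PySem.Set Int) (j : Int) : PySem.Set Int :=
  if j ∈ ts then emb else PySem.Set.add emb j

-- A's outer loop body over i in range(n_bars), state (in_region, region_end, embargoed)
def scanStep (ts : PySem.Set Int) (e n : Int) (st : Bool × Int × PySem.Set Int) (i : Int) :
    Bool × Int × PySem.Set Int :=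
  if i ∈ ts then (true, i, st.2.2)
  else if st.1 then
    (false, st.2.1,
      (PySem.List.pyRange (st.2.1 + 1) (min (st.2.1 + 1 + e) n) 1).foldl (embStep ts) st.2.2)
  else st

def purged_train_indices_py (test_indices : List Int) (embargo_bars : Int) (n_bars : Int) : List Int :=
  let test_set : PySem.Set Int := PySem.Set.ofList test_indices
  let embargoed : PySem.Set Int :=
    if embargo_bars > 0 ∧ test_indices ≠ [] then
      ((PySem.List.pyRange 0 n_bars 1).foldl (scanStep test_set embargo_bars n_bars)
        (false, -1, PySem.Set.empty)).2.2
    else PySem.Set.empty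
  (PySem.List.pyRange 0 n_bars 1).filter
    (fun i => decide (i ∉ test_set ∧ i ∉ embargoed))

-- ===== PORT B =====
-- B's per-bar predicate: bar i trains iff it is not a test bar and no region end
-- (t in test set, t+1 not) lies in range(max(0, i - embargo_bars), i)
def isTrain (ts : PySem.Set Int) (e : Int) (i : Int) : Bool :=
  if i ∈ ts then false
  else !((PySem.List.pyRange (max 0 (i - e)) i 1).any
      (fun t => decide (t ∈ ts ∧ (t + 1) ∉ ts)))

def purged_train_indices_py_alt (test_indices : List Int) (embargo_bars : Int) (n_bars : Int) : List Int :=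
  let test_set : PySem.Set Int := PySem.Set.ofList test_indices
  (PySem.List.pyRange 0 n_bars 1).filter (isTrain test_set embargo_bars)

-- ===== PRECONDITION & SPEC =====
def Spec_purged_train_indices_py (test_indices : List Int) (embargo_bars : Int) (n_bars : Int) (out : List Int) : Prop := out = purged_train_indices_py_alt test_indices embargo_bars n_bars
instance (test_indices : List Int) (embargo_bars : Int) (n_bars : Int) (out : List Int) : Decidable (Spec_purged_train_indices_py test_indices embargo_bars n_bars out) := by unfold Spec_purged_train_indices_py; infer_instance

-- ===== CLAIM (what is proved, stated in full; the proofs are below) =====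
def Claim_equal_purged_train_indices_py : Prop := ∀ (test_indices : List Int) (embargo_bars : Int) (n_bars : Int), Dom_purged_train_indices_py test_indices embargo_bars n_bars → Spec_purged_train_indices_py test_indices embargo_bars n_bars (purged_train_indices_py test_indices embargo_bars n_bars)

-- ===== LEMMAS AND PROOFS =====

-- membership after A's inner embargo loop
theorem mem_embStep_foldl (ts : PySem.Set Int) (L : List Int) (emb : PySem.Set Int) (j : Int) :
    j ∈ L.foldl (embStep ts) emb ↔ j ∈ emb ∨ (j ∈ L ∧ j ∉ ts) := by
  induction L generalizing emb with
  | nil => simp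
  | cons a L ih =>
    simp only [List.foldl_cons, ih, embStep]
    split_ifs with h
    · simp only [List.mem_cons]
      constructor
      · rintro (h1 | ⟨h1, h2⟩)
        · exact Or.inl h1
        · exact Or.inr ⟨Or.inr h1, h2⟩
      · rintro (h1 | ⟨h1 | h1, h2⟩)
        · exact Or.inl h1
        · exact absurd (h1.symm ▸ h) h2
        · exact Or.inr ⟨h1, h2⟩
    · simp only [PySem.Set.mem_add, List.mem_cons]
      by_cases hja : j = a
      · subst hja; simp [h]
      · tauto

-- last test index seen strictly below m (or -1)
def lastT (ts : PySem.Set Int) : Nat → Int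
  | 0 => -1
  | m + 1 => if (m : Int) ∈ ts then (m : Int) else lastT ts m

-- what A's scan has embargoed after the first m bars
def Acond (ts : PySem.Set Int) (e n : Int) (m : Nat) (j : Int) : Prop :=
  ∃ t ∈ ts, 0 ≤ t ∧ t + 1 < (m : Int) ∧ (t + 1) ∉ ts ∧
    t + 1 ≤ j ∧ j < min (t + 1 + e) n ∧ j ∉ ts

-- the invariant of A's scan over the first m bars
theorem scan_invariant (ts : PySem.Set Int) (e n : Int) (m : Nat) :
    ((PySem.List.pyRange 0 (m : Int) 1).foldl (scanStep ts e n)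
      (false, -1, PySem.Set.empty)).1 = decide (0 < m ∧ ((m : Int) - 1) ∈ ts) ∧
    ((PySem.List.pyRange 0 (m : Int) 1).foldl (scanStep ts e n)
      (false, -1, PySem.Set.empty)).2.1 = lastT ts m ∧
    ∀ j, j ∈ ((PySem.List.pyRange 0 (m : Int) 1).foldl (scanStep ts e n)
      (false, -1, PySem.Set.empty)).2.2 ↔ Acond ts e n m j := by
  induction m with
  | zero =>
    rw [Nat.cast_zero, PySem.List.pyRange_one_eq_nil le_rfl]
    refine ⟨by simp, rfl, fun j => ?_⟩
    simp only [List.foldl_nil, Acond]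
    constructor
    · intro hmem; exact absurd hmem (by simp [PySem.Set.empty])
    · rintro ⟨t, _, _, h2, _⟩; omega
  | succ k ih =>
    have hsplit : PySem.List.pyRange 0 ((k + 1 : Nat) : Int) 1
        = PySem.List.pyRange 0 (k : Int) 1 ++ [(k : Int)] := by
      have hc : ((k + 1 : Nat) : Int) = (k : Int) + 1 := by push_cast; ring
      rw [hc, PySem.List.pyRange_one_succ_right (Int.natCast_nonneg k)]
    simp only [hsplit, List.foldl_append, List.foldl_cons, List.foldl_nil]
    obtain ⟨h1, h2, h3⟩ := ih
    set s := (PySem.List.pyRange 0 (k : Int) 1).foldl (scanStep ts e n)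
      (false, -1, PySem.Set.empty) with hs
    by_cases hk : (k : Int) ∈ ts
    · -- bar k is a test bar: enter/stay in region, region_end := k
      have hstep : scanStep ts e n s (k : Int) = (true, (k : Int), s.2.2) := by
        simp [scanStep, hk]
      rw [hstep]
      refine ⟨by simp [hk], by simp [lastT, hk], fun j => ?_⟩
      rw [h3 j]
      simp only [Acond]
      constructor
      · rintro ⟨t, ht, h0, hlt, hn1, hj1, hj2, hj3⟩
        exact ⟨t, ht, h0, by push_cast at hlt ⊢; omega, hn1, hj1, hj2, hj3⟩
      · rintro ⟨t, ht, h0, hlt, hn1, hj1, hj2, hj3⟩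
        refine ⟨t, ht, h0, ?_, hn1, hj1, hj2, hj3⟩
        by_cases he : t + 1 = (k : Int)
        · exact absurd (he ▸ hk) hn1
        · have he' := he; push_cast at hlt ⊢; omega
    · by_cases hr : s.1 = true
      · -- bar k not a test bar while in a region: region ended at k-1
        have hr' := hr
        rw [h1] at hr'
        have hk0 : 0 < k ∧ ((k : Int) - 1) ∈ ts := by simpa using hr'
        have hre : s.2.1 = (k : Int) - 1 := by
          rw [h2]
          rcases k with _ | k'
          · exact absurd hk0.1 (by omega)
          · simp only [lastT]
            have hc : ((k' : Int)) = ((k' + 1 : Nat) : Int) - 1 := by push_cast; ring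
            rw [if_pos (hc ▸ hk0.2)]
            push_cast; ring
        have hstep : scanStep ts e n s (k : Int) =
            (false, s.2.1,
              (PySem.List.pyRange (s.2.1 + 1) (min (s.2.1 + 1 + e) n) 1).foldl
                (embStep ts) s.2.2) := by
          simp [scanStep, hk, hr]
        rw [hstep]
        refine ⟨by simp [hk], by simp only [lastT, if_neg hk, h2], fun j => ?_⟩
        rw [mem_embStep_foldl, h3 j, PySem.List.mem_pyRange_one, hre]
        have hke : ((k : Int)) - 1 + 1 = (k : Int) := by ring
        rw [hke]
        simp only [Acond]
        constructor
        · rintro (⟨t, ht, h0, hlt, hn1, hj1, hj2, hj3⟩ | ⟨⟨hj1, hj2⟩, hj3⟩)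
          · exact ⟨t, ht, h0, by push_cast at hlt ⊢; omega, hn1, hj1, hj2, hj3⟩
          · refine ⟨(k : Int) - 1, hk0.2, by have := hk0.1; omega, by push_cast; omega,
              by rw [hke]; exact hk, by omega, by rw [hke]; exact hj2, hj3⟩
        · rintro ⟨t, ht, h0, hlt, hn1, hj1, hj2, hj3⟩
          by_cases he : t + 1 = (k : Int)
          · right
            refine ⟨⟨by omega, ?_⟩, hj3⟩
            rw [← he]; exact hj2
          · exact Or.inl ⟨t, ht, h0, by have := he; push_cast at hlt ⊢; omega,
              hn1, hj1, hj2, hj3⟩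
      · -- bar k not a test bar, outside any region: state unchanged
        have hstep : scanStep ts e n s (k : Int) = s := by
          simp [scanStep, hk, hr]
        rw [hstep]
        have hs1 : s.1 = false := by
          cases hb : s.1
          · rfl
          · exact absurd hb hr
        have hnotpred : ¬ (0 < k ∧ ((k : Int) - 1) ∈ ts) := by
          intro hcon
          rw [h1] at hs1
          simp only [decide_eq_false_iff_not] at hs1
          exact hs1 hcon
        refine ⟨?_, by rw [h2]; simp [lastT, hk], fun j => ?_⟩
        · rw [hs1]
          symm
          rw [decide_eq_false_iff_not]
          push_cast
          intro hcon
          have hc : ((k : Int)) + 1 - 1 = (k : Int) := by ring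
          rw [hc] at hcon
          exact hk hcon.2
        · rw [h3 j]
          simp only [Acond]
          constructor
          · rintro ⟨t, ht, h0, hlt, hn1, hj1, hj2, hj3⟩
            exact ⟨t, ht, h0, by push_cast at hlt ⊢; omega, hn1, hj1, hj2, hj3⟩
          · rintro ⟨t, ht, h0, hlt, hn1, hj1, hj2, hj3⟩
            refine ⟨t, ht, h0, ?_, hn1, hj1, hj2, hj3⟩
            by_cases he : t + 1 = (k : Int)
            · exfalso
              apply hnotpred
              refine ⟨by omega, ?_⟩
              have hc : ((k : Int)) - 1 = t := by omega
              rw [hc]; exact ht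
            · have := he; push_cast at hlt ⊢; omega

-- closed-form membership in A's full embargoed set
theorem mem_Aemb (test_indices : List Int) (e n : Int) (j : Int) :
    (j ∈ (if e > 0 ∧ test_indices ≠ [] then
        ((PySem.List.pyRange 0 n 1).foldl
          (scanStep (PySem.Set.ofList test_indices) e n)
          (false, -1, PySem.Set.empty)).2.2
      else PySem.Set.empty)) ↔
    ∃ t ∈ PySem.Set.ofList test_indices, 0 ≤ t ∧ t + 1 < n ∧
      (t + 1) ∉ PySem.Set.ofList test_indices ∧
      t + 1 ≤ j ∧ j < min (t + 1 + e) n ∧ j ∉ PySem.Set.ofList test_indices := by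
  set ts := PySem.Set.ofList test_indices with hts
  have hBempty : (j ∈ (PySem.Set.empty : PySem.Set Int)) ↔ False := by
    simp [PySem.Set.empty]
  by_cases hg : e > 0 ∧ test_indices ≠ []
  · rw [if_pos hg]
    have hn : PySem.List.pyRange 0 n 1 = PySem.List.pyRange 0 ((n.toNat : Nat) : Int) 1 := by
      rcases le_or_gt n 0 with h | h
      · rw [PySem.List.pyRange_one_eq_nil h, PySem.List.pyRange_one_eq_nil (by omega)]
      · congr 1; omega
    rw [hn, (scan_invariant ts e n n.toNat).2.2 j]
    simp only [Acond]
    constructor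
    · rintro ⟨t, ht, h0, hlt, hn1, hj1, hj2, hj3⟩
      exact ⟨t, ht, h0, by omega, hn1, hj1, hj2, hj3⟩
    · rintro ⟨t, ht, h0, hlt, hn1, hj1, hj2, hj3⟩
      exact ⟨t, ht, h0, by omega, hn1, hj1, hj2, hj3⟩
  · rw [if_neg hg, hBempty]
    simp only [false_iff]
    rintro ⟨t, ht, h0, hlt, hn1, hj1, hj2, hj3⟩
    rcases not_and_or.mp hg with he | hne
    · have : j < t + 1 + e := lt_of_lt_of_le hj2 (min_le_left _ _)
      omega
    · have hnil : test_indices = [] := not_not.mp hne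
      rw [hts, hnil, PySem.Set.ofList_nil] at ht
      exact absurd ht (List.not_mem_nil)

-- ===== VERDICT (by name: the statement is the Claim_ definition above) =====
theorem purged_train_indices_py_spec : Claim_equal_purged_train_indices_py := by
  intro test_indices e n _
  unfold Spec_purged_train_indices_py
  simp only [purged_train_indices_py, purged_train_indices_py_alt]
  apply List.filter_congr
  intro i hi
  rw [PySem.List.mem_pyRange_one] at hi
  set ts := PySem.Set.ofList test_indices with hts
  unfold isTrain
  by_cases hit : i ∈ ts
  · simp [hit]
  · rw [if_neg hit]
    have hA := mem_Aemb test_indices e n i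
    rw [← hts] at hA
    cases hany : (PySem.List.pyRange (max 0 (i - e)) i 1).any
        (fun t => decide (t ∈ ts ∧ (t + 1) ∉ ts)) with
    | true =>
      rw [Bool.not_true]
      rw [List.any_eq_true] at hany
      obtain ⟨t, htmem, hp⟩ := hany
      rw [PySem.List.mem_pyRange_one] at htmem
      rw [decide_eq_true_eq] at hp
      have hemb : i ∈ (if e > 0 ∧ test_indices ≠ [] then
          ((PySem.List.pyRange 0 n 1).foldl (scanStep ts e n)
            (false, -1, PySem.Set.empty)).2.2
        else PySem.Set.empty) := by
        apply hA.mpr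
        refine ⟨t, hp.1, by omega, by omega, hp.2, by omega, by omega, hit⟩
      rw [decide_eq_false_iff_not]
      rintro ⟨-, hni⟩
      exact hni hemb
    | false =>
      rw [Bool.not_false]
      rw [List.any_eq_false] at hany
      have hni : i ∉ (if e > 0 ∧ test_indices ≠ [] then
          ((PySem.List.pyRange 0 n 1).foldl (scanStep ts e n)
            (false, -1, PySem.Set.empty)).2.2
        else PySem.Set.empty) := by
        intro hemb
        obtain ⟨t, ht, h0, hlt, hn1, hj1, hj2, hj3⟩ := hA.mp hemb
        have := hany t (by rw [PySem.List.mem_pyRange_one]; omega)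
        rw [decide_eq_true_eq] at this
        exact this ⟨ht, hn1⟩
      rw [decide_eq_true_eq]
      exact ⟨hit, hni⟩
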